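-- pv_equiv track=rewrite | github.com/FuHehe12/Nitro-Engine | translate/scripts/split_md.py | precompute_code_block_ranges
-- ===== SOURCE A (Python) =====
-- def precompute_code_block_ranges(lines: list[str]) -> list[tuple[int, int]]:
--     """
--     预计算所有代码块的行号区间。
--     返回 [(start, end), ...]，start 是 ``` 开始行，end 是 ``` 结束行。
--     """
--     ranges = []
--     open_line = None
--
--     for i, line in enumerate(lines):
--         if line.strip().startswith("```"):
--             if open_line is None:
--                 open_line = i
--             else:
--                 ranges.append((open_line, i))
--                 open_line = None
--
--     # 未闭合的代码块延伸到文件末尾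
--     if open_line is not None:
--         ranges.append((open_line, len(lines)))
--
--     return ranges
-- ===== SOURCE B (Python) =====
-- def _pair(fences, end):
--     if len(fences) >= 2:
--         return [(fences[0], fences[1])] + _pair(fences[2:], end)
--     if len(fences) == 1:
--         return [(fences[0], end)]
--     return []
--
--
-- def precompute_code_block_ranges(lines: list[str]) -> list[tuple[int, int]]:
--     fences = [i for i, line in enumerate(lines) if line.strip().startswith("```")]
--     return _pair(fences, len(lines))
-- ===== Notes on version B (the rewrite author's own statement) =====
-- stated objective: alternative
-- what changed: Replaces the toggling open_line state machine with an explicit table of fence-line indices built by one comprehension, then paired two at a time by a recursive pairing pass (odd trailing fence extends to len(lines)).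
import Mathlib
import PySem

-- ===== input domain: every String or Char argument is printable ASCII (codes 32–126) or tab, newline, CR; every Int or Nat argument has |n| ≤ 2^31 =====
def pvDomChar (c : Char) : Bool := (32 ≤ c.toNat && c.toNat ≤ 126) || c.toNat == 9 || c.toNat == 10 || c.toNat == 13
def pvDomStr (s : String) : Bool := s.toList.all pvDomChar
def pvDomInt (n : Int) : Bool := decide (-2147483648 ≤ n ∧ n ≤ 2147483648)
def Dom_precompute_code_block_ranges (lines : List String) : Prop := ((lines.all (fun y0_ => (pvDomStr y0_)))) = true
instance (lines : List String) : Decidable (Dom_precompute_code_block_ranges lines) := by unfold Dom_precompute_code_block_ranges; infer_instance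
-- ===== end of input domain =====

-- B replaces A's toggling open_line state machine by an explicit fence-index table paired two at a time (alternative decomposition, same cost).

-- ===== PORT A =====
-- loop body: toggling open_line state over enumerate(lines)
def pvStepA (st : List (Int × Int) × Option Int) (p : Int × String) : List (Int × Int) × Option Int :=
  if PySem.Str.startswith (PySem.Str.strip p.2) "```" then
    match st.2 with
    | none => (st.1, some p.1)
    | some o => (st.1 ++ [(o, p.1)], none)
  else st

def precompute_code_block_ranges (lines : List String) : List (Int × Int) :=
  let st := (PySem.List.enumerate lines).foldl pvStepA ([], none)
  match st.2 with
  | none => st.1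
  | some o => st.1 ++ [(o, (lines.length : Int))]

-- ===== PORT B =====
-- _pair from Source B: pair the fence indices two at a time; an odd trailing fence extends to end
def pvPair : List Int → Int → List (Int × Int)
  | a :: b :: rest, n => (a, b) :: pvPair rest n
  | [a], n => [(a, n)]
  | [], _ => []

def precompute_code_block_ranges_alt (lines : List String) : List (Int × Int) :=
  let fences := (PySem.List.enumerate lines).filterMap
    (fun p => if PySem.Str.startswith (PySem.Str.strip p.2) "```" then some p.1 else none)
  pvPair fences (lines.length : Int)

-- ===== PRECONDITION & SPEC =====
def Spec_precompute_code_block_ranges (lines : List String) (out : List (Int × Int)) : Prop := out = precompute_code_block_ranges_alt lines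
instance (lines : List String) (out : List (Int × Int)) : Decidable (Spec_precompute_code_block_ranges lines out) := by unfold Spec_precompute_code_block_ranges; infer_instance

-- ===== CLAIM (what is proved, stated in full; the proofs are below) =====
def Claim_equal_precompute_code_block_ranges : Prop := ∀ (lines : List String), Dom_precompute_code_block_ranges lines → Spec_precompute_code_block_ranges lines (precompute_code_block_ranges lines)

-- ===== LEMMAS AND PROOFS =====

-- close off A's final state: append the unclosed range if one is open
def pvFinish (st : List (Int × Int) × Option Int) (n : Int) : List (Int × Int) :=
  match st.2 with
  | none => st.1
  | some o => st.1 ++ [(o, n)]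

-- invariant of A's loop: finishing the fold equals the accumulator plus pairing the
-- pending open fence (if any) together with the fence indices of the remaining lines
lemma pvLoop_eq (xs : List (Int × String)) (acc : List (Int × Int)) (st : Option Int) (n : Int) :
    pvFinish (xs.foldl pvStepA (acc, st)) n =
      acc ++ pvPair (st.toList ++ xs.filterMap
        (fun p => if PySem.Str.startswith (PySem.Str.strip p.2) "```" then some p.1 else none)) n := by
  induction xs generalizing acc st with
  | nil =>
    cases st <;> simp [pvFinish, pvPair]
  | cons x xs ih =>
    simp only [List.foldl_cons, List.filterMap_cons, pvStepA]
    split_ifs with hf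
    · cases st with
      | none => rw [ih]; simp
      | some o => rw [ih]; simp [pvPair]
    · cases st with
      | none => rw [ih]
      | some o => rw [ih]

-- ===== VERDICT (by name: the statement is the Claim_ definition above) =====
theorem precompute_code_block_ranges_spec : Claim_equal_precompute_code_block_ranges := by
  intro lines _
  unfold Spec_precompute_code_block_ranges precompute_code_block_ranges precompute_code_block_ranges_alt
  have h := pvLoop_eq (PySem.List.enumerate lines) [] none (lines.length : Int)
  simpa [pvFinish] using h
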